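-- pv_equiv track=rewrite | github.com/LouieShao/BWR | core/BWR_Compress.py | BWR_Encode_4
-- ===== SOURCE A (Python) =====
-- import math
--
-- def BWR_Encode_4(imgdif,totalbytes):
--     tempoutputbyte=0 # Store the byte generated now 0..255
--     tempoutputbit=4 # The bit number of tempoutputbyte handled now
--     currentbyte=0 # Store the byte handled now 0..(totalbytes-1)
--     currentbit=5 # The bit number handled now 0,1,5
--     outputarr=[] # The array for output
--     while currentbit>=1:
--         while currentbyte<=totalbytes-1:
--             tempoutputbyte|=((imgdif[currentbyte]&int(15*math.pow(2,currentbit)))>>currentbit)<<tempoutputbit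
--             tempoutputbit-=4
--             if tempoutputbit<0:
--                 outputarr.append(tempoutputbyte)
--                 tempoutputbyte=0
--                 tempoutputbit=4
--             currentbyte+=1
--         currentbit-=4
--         currentbyte=0
--     if tempoutputbit!=4: # Flush the tempoutputbyte if it had data left
--         outputarr.append(tempoutputbyte)
--     tempoutputbyte=0
--     tempoutputbit=7
--     currentbyte=0
--     currentbit=0
--     while currentbit>=0:
--         while currentbyte<=totalbytes-1:
--             tempoutputbyte|=((imgdif[currentbyte]&int(math.pow(2,currentbit)))>>currentbit)<<tempoutputbit
--             tempoutputbit-=1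
--             if tempoutputbit<0:
--                 outputarr.append(tempoutputbyte)
--                 tempoutputbyte=0
--                 tempoutputbit=7
--             currentbyte+=1
--         currentbit-=1
--         currentbyte=0
--     if tempoutputbit!=7: # Flush the tempoutputbyte if it had data left
--         outputarr.append(tempoutputbyte)
--     return outputarr
-- ===== SOURCE B (Python) =====
-- def bitbyte(chunk):
--     byte = 0
--     for k, b in enumerate(chunk):
--         byte |= b << (7 - k)
--     return byte
--
-- def BWR_Encode_4(imgdif, totalbytes):
--     data = [imgdif[i] for i in range(totalbytes)]
--     nib = [(x >> 5) & 15 for x in data] + [(x >> 1) & 15 for x in data]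
--     out = [(nib[j] << 4) | nib[j + 1] for j in range(0, len(nib), 2)]
--     bits = [x & 1 for x in data]
--     out += [bitbyte(bits[j:j + 8]) for j in range(0, len(bits), 8)]
--     return out
-- ===== Notes on version B (the rewrite author's own statement) =====
-- stated objective: faster
-- what changed: Replaces A's cross-iteration shift-register (tempoutputbyte/tempoutputbit carried across nested while-loops with flush-on-underflow tests and a math.pow mask per element) by stateless chunking: each output byte is computed independently from its own nibble pair or its own 8-bit slice via comprehensions, with no running bit position and no flush logic.
-- outside the precondition, e.g. on BWR_Encode_4([1], 2): A raises IndexError, B raises IndexError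
import Mathlib
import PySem

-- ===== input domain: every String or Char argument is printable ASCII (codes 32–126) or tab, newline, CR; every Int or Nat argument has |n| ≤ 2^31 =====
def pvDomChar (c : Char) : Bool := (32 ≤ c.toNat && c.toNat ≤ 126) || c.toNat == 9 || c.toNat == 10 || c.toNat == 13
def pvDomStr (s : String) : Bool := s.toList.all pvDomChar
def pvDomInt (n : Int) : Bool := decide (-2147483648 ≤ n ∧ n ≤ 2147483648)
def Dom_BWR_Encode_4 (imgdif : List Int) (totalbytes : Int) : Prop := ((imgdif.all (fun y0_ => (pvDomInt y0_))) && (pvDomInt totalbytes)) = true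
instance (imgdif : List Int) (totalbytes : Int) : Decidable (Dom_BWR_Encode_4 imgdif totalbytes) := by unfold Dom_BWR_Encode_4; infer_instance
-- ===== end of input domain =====

-- ===== PORT A =====
-- B replaces A's cross-iteration shift-register (partial byte + bit position carried across
-- nested while-loops, flushed when the position underflows, math.pow mask per element) by
-- stateless chunking: each output byte is built independently from its own nibble pair / 8-bit
-- slice (objective: faster by a constant factor, measured).
-- Equivalence of RETURN values on Pre_; no argument is mutated.

-- inner 'while currentbyte<=totalbytes-1' body of the nibble section; state = (tempoutputbyte, tempoutputbit, outputarr).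
-- imgdif[currentbyte] is in range under Pre_, so pyGetD _ _ 0 is exact there.
-- int(15*math.pow(2,currentbit)) is exactly 15 * 2^currentbit for currentbit in {5,1}.
def pvAStepNib (imgdif : List Int) (cb : Int) (s : Int × Int × List Int) (i : Int) : Int × Int × List Int :=
  let b := PySem.Int.bor s.1 (((PySem.Int.band (PySem.List.pyGetD imgdif i 0) (15 * 2 ^ cb.toNat)) >>> cb.toNat) <<< s.2.1.toNat)
  let p := s.2.1 - 4
  if p < 0 then (0, 4, s.2.2 ++ [b]) else (b, p, s.2.2)

-- outer 'while currentbit>=1' (currentbit = 5, 1); the inner while over currentbyte is the pyRange fold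
def pvAOuterNib (imgdif : List Int) (totalbytes : Int) (cb : Int) (s : Int × Int × List Int) : Int × Int × List Int :=
  if 1 ≤ cb then
    pvAOuterNib imgdif totalbytes (cb - 4) ((PySem.List.pyRange 0 totalbytes 1).foldl (pvAStepNib imgdif cb) s)
  else s
termination_by (cb + 3).toNat
decreasing_by omega

-- inner body of the bit section ('int(math.pow(2,currentbit))' = 2^currentbit for currentbit = 0)
def pvAStepBit (imgdif : List Int) (cb : Int) (s : Int × Int × List Int) (i : Int) : Int × Int × List Int :=
  let b := PySem.Int.bor s.1 (((PySem.Int.band (PySem.List.pyGetD imgdif i 0) (2 ^ cb.toNat)) >>> cb.toNat) <<< s.2.1.toNat)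
  let p := s.2.1 - 1
  if p < 0 then (0, 7, s.2.2 ++ [b]) else (b, p, s.2.2)

-- outer 'while currentbit>=0' (currentbit = 0)
def pvAOuterBit (imgdif : List Int) (totalbytes : Int) (cb : Int) (s : Int × Int × List Int) : Int × Int × List Int :=
  if 0 ≤ cb then
    pvAOuterBit imgdif totalbytes (cb - 1) ((PySem.List.pyRange 0 totalbytes 1).foldl (pvAStepBit imgdif cb) s)
  else s
termination_by (cb + 1).toNat
decreasing_by omega

def BWR_Encode_4 (imgdif : List Int) (totalbytes : Int) : List Int :=
  let s1 := pvAOuterNib imgdif totalbytes 5 (0, 4, [])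
  let out1 := if s1.2.1 ≠ 4 then s1.2.2 ++ [s1.1] else s1.2.2
  let s2 := pvAOuterBit imgdif totalbytes 0 (0, 7, out1)
  if s2.2.1 ≠ 7 then s2.2.2 ++ [s2.1] else s2.2.2

-- ===== PORT B =====
-- 'byte = 0; for k, b in enumerate(chunk): byte |= b << (7 - k)' — chunk has length ≤ 8
def pvBitByte (chunk : List Int) : Int :=
  (PySem.List.enumerate chunk).foldl (fun byte kb => PySem.Int.bor byte (kb.2 <<< (7 - kb.1).toNat)) 0

def BWR_Encode_4_alt (imgdif : List Int) (totalbytes : Int) : List Int :=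
  let data := (PySem.List.pyRange 0 totalbytes 1).map (fun i => PySem.List.pyGetD imgdif i 0)
  let nib := data.map (fun (x : Int) => PySem.Int.band (x >>> (5 : Nat)) 15)
          ++ data.map (fun (x : Int) => PySem.Int.band (x >>> (1 : Nat)) 15)
  -- '[(nib[j] << 4) | nib[j + 1] for j in range(0, len(nib), 2)]'
  let out1 := (PySem.List.pyRange 0 (nib.length : Int) 2).map
      (fun j => PySem.Int.bor (PySem.List.pyGetD nib j 0 <<< (4 : Nat)) (PySem.List.pyGetD nib (j + 1) 0))
  let bits := data.map (fun (x : Int) => PySem.Int.band x 1)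
  -- '[bitbyte(bits[j:j + 8]) for j in range(0, len(bits), 8)]'
  let out2 := (PySem.List.pyRange 0 (bits.length : Int) 8).map
      (fun j => pvBitByte (PySem.List.slice bits (some j) (some (j + 8))))
  out1 ++ out2

-- ===== PRECONDITION & SPEC =====
-- A indexes imgdif[0..totalbytes-1]; beyond the length Python raises IndexError, so exactly those are excluded.
def Pre_BWR_Encode_4 (imgdif : List Int) (totalbytes : Int) : Prop := totalbytes ≤ (imgdif.length : Int)
instance (imgdif : List Int) (totalbytes : Int) : Decidable (Pre_BWR_Encode_4 imgdif totalbytes) := by unfold Pre_BWR_Encode_4; infer_instance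
def pvWitness_BWR_Encode_4 : List Int × Int := ([7, -300], 2)
def Spec_BWR_Encode_4 (imgdif : List Int) (totalbytes : Int) (out : List Int) : Prop := out = BWR_Encode_4_alt imgdif totalbytes
instance (imgdif : List Int) (totalbytes : Int) (out : List Int) : Decidable (Spec_BWR_Encode_4 imgdif totalbytes out) := by unfold Spec_BWR_Encode_4; infer_instance

-- ===== CLAIM (what is proved, stated in full; the proofs are below) =====
def Claim_equal_BWR_Encode_4 : Prop := ∀ (imgdif : List Int) (totalbytes : Int), Dom_BWR_Encode_4 imgdif totalbytes → Pre_BWR_Encode_4 imgdif totalbytes → Spec_BWR_Encode_4 imgdif totalbytes (BWR_Encode_4 imgdif totalbytes)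

-- ===== LEMMAS AND PROOFS =====

-- proof-side chunk views: one byte per nibble pair / per 8-bit chunk
def pvPairBytes : List Int → List Int
  | v0 :: v1 :: rest => PySem.Int.bor (v0 <<< (4 : Nat)) v1 :: pvPairBytes rest
  | _ => []

def pvBitBytes (l : List Int) : List Int :=
  if h : l = [] then []
  else pvBitByte (l.take 8) :: pvBitBytes (l.drop 8)
termination_by l.length
decreasing_by
  have : l.length ≠ 0 := fun hl => h (List.eq_nil_of_length_eq_zero hl)
  simp [List.length_drop]; omega

-- B's index comprehension over 'range(0, len(nib), 2)' IS the pairwise chunk view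
theorem pvPairAux : ∀ (m : Nat) (l : List Int), l.length = 2 * m →
    (List.range m).map (fun k =>
        PySem.Int.bor ((l.getD (2 * k) 0) <<< (4 : Nat)) (l.getD (2 * k + 1) 0)) = pvPairBytes l := by
  intro m
  induction m with
  | zero =>
    intro l h
    have hnil : l = [] := List.eq_nil_of_length_eq_zero (by omega)
    subst hnil
    simp [pvPairBytes]
  | succ m ih =>
    intro l h
    match l, h with
    | v0 :: v1 :: t, h =>
      rw [List.range_succ_eq_map]
      simp only [List.map_cons, List.map_map, pvPairBytes]
      congr 1
      rw [show ((fun k => PySem.Int.bor ((v0 :: v1 :: t).getD (2 * k) 0 <<< (4 : Nat))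
              ((v0 :: v1 :: t).getD (2 * k + 1) 0)) ∘ Nat.succ)
            = (fun k => PySem.Int.bor ((t.getD (2 * k) 0) <<< (4 : Nat)) (t.getD (2 * k + 1) 0)) from
            funext fun k => by
              simp only [Function.comp_apply,
                show 2 * Nat.succ k = 2 * k + 1 + 1 from by omega,
                List.getD_cons_succ]]
      exact ih t (by simp at h; omega)

theorem pvBridgePair (m : Nat) (l : List Int) (h : l.length = 2 * m) :
    (PySem.List.pyRange 0 (l.length : Int) 2).map
      (fun j => PySem.Int.bor (PySem.List.pyGetD l j 0 <<< (4 : Nat)) (PySem.List.pyGetD l (j + 1) 0))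
    = pvPairBytes l := by
  rw [PySem.List.pyRange_of_pos 0 _ (by norm_num : (0 : Int) < 2),
    show (if (0 : Int) < (l.length : Int) then (((l.length : Int) - 0 + 2 - 1) / 2).toNat else 0) = m from by
      split_ifs <;> omega,
    List.map_map]
  rw [← pvPairAux m l h]
  apply List.map_congr_left
  intro k _
  simp only [Function.comp_apply]
  rw [show (0 : Int) + 2 * (k : Int) = ((2 * k : Nat) : Int) from by push_cast; ring,
    PySem.List.pyGetD_natCast,
    show ((2 * k : Nat) : Int) + 1 = ((2 * k + 1 : Nat) : Int) from by push_cast; ring,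
    PySem.List.pyGetD_natCast]

-- B's index comprehension over 'range(0, len(bits), 8)' with ≤8-wide slices IS the chunk view
theorem pvBitAux : ∀ (l : List Int),
    (List.range ((l.length + 7) / 8)).map (fun k => pvBitByte ((l.drop (8 * k)).take 8))
    = pvBitBytes l := by
  intro l
  induction l using pvBitBytes.induct with
  | case1 => simp [pvBitBytes]
  | case2 l hne ih =>
    have hpos : 0 < l.length := List.length_pos_of_ne_nil hne
    rw [pvBitBytes, dif_neg hne,
      show (l.length + 7) / 8 = ((l.drop 8).length + 7) / 8 + 1 from by
        simp only [List.length_drop]; omega,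
      List.range_succ_eq_map]
    simp only [List.map_cons, List.map_map, Nat.mul_zero, List.drop_zero]
    congr 1
    rw [show ((fun k => pvBitByte ((l.drop (8 * k)).take 8)) ∘ Nat.succ)
          = (fun k => pvBitByte (((l.drop 8).drop (8 * k)).take 8)) from
          funext fun k => by
            simp only [Function.comp_apply, List.drop_drop,
              show 8 * Nat.succ k = 8 + 8 * k from by omega]]
    exact ih

theorem pvBridgeBit (l : List Int) :
    (PySem.List.pyRange 0 (l.length : Int) 8).map
      (fun j => pvBitByte (PySem.List.slice l (some j) (some (j + 8))))
    = pvBitBytes l := by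
  rw [PySem.List.pyRange_of_pos 0 _ (by norm_num : (0 : Int) < 8),
    show (if (0 : Int) < (l.length : Int) then (((l.length : Int) - 0 + 8 - 1) / 8).toNat else 0)
        = (l.length + 7) / 8 from by split_ifs <;> omega,
    List.map_map]
  rw [← pvBitAux l]
  apply List.map_congr_left
  intro k _
  simp only [Function.comp_apply]
  rw [show (0 : Int) + 8 * (k : Int) = ((8 * k : Nat) : Int) from by push_cast; ring,
    show ((8 * k : Nat) : Int) + 8 = ((8 * k : Nat) : Int) + ((8 : Nat) : Int) from by norm_num,
    PySem.List.slice_natCast_add]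


-- canonical MSB-first pack step (proof-side bridge: A's two loop bodies are this step fed the extracted value)
def pvPackStep (width : Nat) (s : Int × Int × List Int) (v : Int) : Int × Int × List Int :=
  let b := PySem.Int.bor s.1 (v <<< s.2.1.toNat)
  let p := s.2.1 - (width : Int)
  if p < 0 then (0, 8 - (width : Int), s.2.2 ++ [b]) else (b, p, s.2.2)

theorem pvNat15 (m : Nat) : m &&& 15 = m % 16 := by
  have := Nat.and_two_pow_sub_one_eq_mod m 4
  norm_num at this
  exact this

theorem pvBandOfNat (a b : Nat) : PySem.Int.band (.ofNat a) (.ofNat b) = .ofNat (a &&& b) := by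
  simp [PySem.Int.band]

theorem pvBandNegSucc (a b : Nat) : PySem.Int.band (.negSucc a) (.ofNat b) = .ofNat (b - (b &&& a)) := by
  simp [PySem.Int.band]

theorem pvShrOfNat (n k : Nat) : (Int.ofNat n) >>> k = Int.ofNat (n >>> k) := by simp
theorem pvShrNegSucc (m k : Nat) : (Int.negSucc m) >>> k = Int.negSucc (m >>> k) := by simp

theorem pvNatMask (m : Nat) (k : Nat) : m &&& (15 <<< k) = 2^k * ((m >>> k) % 16) := by
  apply Nat.eq_of_testBit_eq
  intro i
  rw [show (2:ℕ)^k * ((m >>> k) % 16) = ((m >>> k) % 16) <<< k by simp [Nat.shiftLeft_eq]; ring]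
  rcases Nat.lt_or_ge i k with h | h
  · simp [Nat.testBit_and, Nat.testBit_shiftLeft, Nat.not_le.mpr h]
  · simp only [Nat.testBit_and, Nat.testBit_shiftLeft, h, decide_true, Bool.true_and,
      show (16:ℕ) = 2^4 by norm_num, Nat.testBit_mod_two_pow, Nat.testBit_shiftRight,
      Nat.add_sub_cancel' h,
      show (15:ℕ) = 2^4 - 1 by norm_num, Nat.testBit_two_pow_sub_one]
    rw [Bool.and_comm]

-- the extraction identity: (x & (15 << k)) >> k = (x >> k) & 15, in Python's (two's-complement) semantics
theorem pvBandShift (x : Int) (k : Nat) :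
    PySem.Int.band (x >>> k) 15 = (PySem.Int.band x (Int.ofNat (15 <<< k))) >>> k := by
  cases x with
  | ofNat n =>
    rw [pvShrOfNat, show (15:Int) = Int.ofNat 15 from rfl, pvBandOfNat, pvBandOfNat, pvShrOfNat]
    congr 1
    rw [pvNatMask, pvNat15, Nat.shiftRight_eq_div_pow (m := 2^k * _),
      Nat.mul_div_cancel_left _ (Nat.two_pow_pos k)]
  | negSucc m =>
    rw [pvShrNegSucc, show (15:Int) = Int.ofNat 15 from rfl, pvBandNegSucc, pvBandNegSucc, pvShrOfNat]
    congr 1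
    rw [Nat.and_comm 15 (m >>> k), pvNat15, Nat.and_comm (15 <<< k) m, pvNatMask,
      Nat.shiftLeft_eq, mul_comm 15 ((2:ℕ)^k), ← Nat.mul_sub,
      Nat.shiftRight_eq_div_pow (m := 2^k * _), Nat.mul_div_cancel_left _ (Nat.two_pow_pos k)]

-- A's nibble step at currentbit = 5 / 1 IS the width-4 pack step fed the extracted nibble
theorem pvStepNib5 (imgdif : List Int) (s : Int × Int × List Int) (i : Int) :
    pvAStepNib imgdif 5 s i = pvPackStep 4 s (PySem.Int.band (PySem.List.pyGetD imgdif i 0 >>> (5:Nat)) 15) := by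
  have h : PySem.Int.band (PySem.List.pyGetD imgdif i 0) (15 * 2 ^ (5:Int).toNat) >>> (5:Int).toNat
      = PySem.Int.band (PySem.List.pyGetD imgdif i 0 >>> (5:Nat)) 15 := by
    rw [show ((5:Int).toNat) = 5 from rfl, show (15 * 2 ^ 5 : Int) = Int.ofNat (15 <<< 5) by decide]
    exact (pvBandShift _ 5).symm
  simp only [pvAStepNib, pvPackStep, h]
  norm_num

theorem pvStepNib1 (imgdif : List Int) (s : Int × Int × List Int) (i : Int) :
    pvAStepNib imgdif 1 s i = pvPackStep 4 s (PySem.Int.band (PySem.List.pyGetD imgdif i 0 >>> (1:Nat)) 15) := by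
  have h : PySem.Int.band (PySem.List.pyGetD imgdif i 0) (15 * 2 ^ (1:Int).toNat) >>> (1:Int).toNat
      = PySem.Int.band (PySem.List.pyGetD imgdif i 0 >>> (1:Nat)) 15 := by
    rw [show ((1:Int).toNat) = 1 from rfl, show (15 * 2 ^ 1 : Int) = Int.ofNat (15 <<< 1) by decide]
    exact (pvBandShift _ 1).symm
  simp only [pvAStepNib, pvPackStep, h]
  norm_num

theorem pvStepBit0 (imgdif : List Int) (s : Int × Int × List Int) (i : Int) :
    pvAStepBit imgdif 0 s i = pvPackStep 1 s (PySem.Int.band (PySem.List.pyGetD imgdif i 0) 1) := by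
  simp [pvAStepBit, pvPackStep]

-- running bit accumulator, starting at bit index j (MSB-first)
def pvG (j : Nat) (acc : Int) : List Int → Int
  | [] => acc
  | b :: t => pvG (j + 1) (PySem.Int.bor acc (b <<< (7 - j))) t

theorem pvGByteAux (chunk : List Int) : ∀ (j : Nat) (acc : Int), j + chunk.length ≤ 8 →
    (PySem.List.enumerate chunk (j : Int)).foldl
      (fun byte kb => PySem.Int.bor byte (kb.2 <<< (7 - kb.1).toNat)) acc = pvG j acc chunk := by
  induction chunk with
  | nil => intro j acc _; simp [pvG, PySem.List.enumerate_nil]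
  | cons b t ih =>
    intro j acc h
    simp only [PySem.List.enumerate_cons, List.foldl_cons, pvG]
    rw [show ((j : Int) + 1) = ((j + 1 : Nat) : Int) by push_cast; ring,
      show (7 - (j : Int)).toNat = 7 - j by omega]
    exact ih (j + 1) _ (by simp at h ⊢; omega)

theorem pvGByte (chunk : List Int) (h : chunk.length ≤ 8) : pvBitByte chunk = pvG 0 0 chunk := by
  unfold pvBitByte
  exact pvGByteAux chunk 0 0 (by omega)

-- a ≤8-bit chunk through the width-1 pack step, from bit position 7-j
theorem pvChunkFold (chunk : List Int) : ∀ (j : Nat) (acc : Int) (o : List Int),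
    j ≤ 7 → j + chunk.length ≤ 8 →
    chunk.foldl (pvPackStep 1) (acc, (7 : Int) - j, o) =
      if j + chunk.length = 8 then (0, 7, o ++ [pvG j acc chunk])
      else (pvG j acc chunk, (7 : Int) - (j + chunk.length : Nat), o) := by
  induction chunk with
  | nil =>
    intro j acc o hj _
    simp only [List.foldl_nil, pvG, List.length_nil, Nat.add_zero]
    rw [if_neg (by omega)]
  | cons b t ih =>
    intro j acc o hj h
    simp only [List.foldl_cons, pvPackStep]
    rw [show ((7 : Int) - j).toNat = 7 - j by omega]
    by_cases hj7 : j = 7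
    · subst hj7
      have ht : t = [] := by
        simp at h; exact List.eq_nil_of_length_eq_zero (by omega)
      subst ht
      simp [pvG]
    · rw [if_neg (by push_cast; omega)]
      simp only [Nat.cast_one]
      rw [show (7 : Int) - j - 1 = (7 : Int) - ((j + 1 : Nat) : Int) by push_cast; ring]
      rw [ih (j + 1) _ o (by omega) (by simp at h ⊢; omega),
        show j + 1 + t.length = j + (t.length + 1) from by ring]
      simp only [pvG, List.length_cons]

-- Python's trailing 'if tempoutputbit!=7: outputarr.append(tempoutputbyte)'
def pvFlush (s : Int × Int × List Int) : List Int :=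
  if s.2.1 ≠ 7 then s.2.2 ++ [s.1] else s.2.2

theorem pvFlushIf (s : Int × Int × List Int) :
    (if s.2.1 ≠ 7 then s.2.2 ++ [s.1] else s.2.2) = pvFlush s := rfl

-- the whole bit phase: fold + final flush = chunked bytes appended to the carried output
theorem pvBitPhase (l : List Int) : ∀ (o : List Int),
    pvFlush (l.foldl (pvPackStep 1) (0, 7, o)) = o ++ pvBitBytes l := by
  induction l using pvBitBytes.induct with
  | case1 => intro o; simp [pvBitBytes, pvFlush]
  | case2 l hne ih =>
    intro o
    rw [pvBitBytes, dif_neg hne]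
    by_cases h8 : 8 ≤ l.length
    · have htl : (l.take 8).length = 8 := by simp [List.length_take]; omega
      conv_lhs => rw [show l = l.take 8 ++ l.drop 8 from (List.take_append_drop 8 l).symm]
      rw [List.foldl_append,
        show ((0 : Int), (7 : Int), o) = ((0 : Int), (7 : Int) - ((0 : Nat) : Int), o) by norm_num,
        pvChunkFold (l.take 8) 0 0 o (by omega) (by simp [htl]),
        if_pos (by simp [htl])]
      rw [ih (o ++ [pvG 0 0 (l.take 8)]), pvGByte (l.take 8) (by omega)]
      simp
    · have hd : l.drop 8 = [] := List.drop_eq_nil_of_le (by omega)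
      have hlt : l.take 8 = l := List.take_of_length_le (by omega)
      have hpos : 0 < l.length := List.length_pos_of_ne_nil hne
      conv_lhs =>
        rw [show ((0 : Int), (7 : Int), o) = ((0 : Int), (7 : Int) - ((0 : Nat) : Int), o) by norm_num]
      rw [pvChunkFold l 0 0 o (by omega) (by omega), if_neg (by omega)]
      unfold pvFlush
      rw [if_pos (by simp; omega)]
      rw [hd, show pvBitBytes ([] : List Int) = [] by simp [pvBitBytes],
        hlt, pvGByte l (by omega)]

-- the whole nibble phase: an even-length value list through the width-4 pack step pairs up exactly
theorem pvNibPhase : ∀ (n : Nat) (vs : List Int) (o : List Int), vs.length = 2 * n →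
    vs.foldl (pvPackStep 4) (0, 4, o) = (0, 4, o ++ pvPairBytes vs) := by
  intro n
  induction n with
  | zero =>
    intro vs o h
    have hnil : vs = [] := List.eq_nil_of_length_eq_zero (by omega)
    subst hnil
    simp [pvPairBytes]
  | succ m ih =>
    intro vs o h
    match vs, h with
    | v0 :: v1 :: t, h =>
      simp only [List.foldl_cons]
      rw [show pvPackStep 4 (0, 4, o) v0 = (PySem.Int.bor 0 (v0 <<< (4:Nat)), 0, o) by
          simp [pvPackStep],
        PySem.Int.bor_comm, PySem.Int.bor_zero,
        show pvPackStep 4 (v0 <<< (4:Nat), 0, o) v1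
            = (0, 4, o ++ [PySem.Int.bor (v0 <<< (4:Nat)) v1]) by
          simp [pvPackStep]]
      rw [ih t _ (by simp at h; omega)]
      simp [pvPairBytes]

-- ===== VERDICT (by name: the statement is the Claim_ definition above) =====
theorem BWR_Encode_4_spec : Claim_equal_BWR_Encode_4 := by
  intro imgdif totalbytes _ _
  unfold Spec_BWR_Encode_4
  -- unroll A's two outer while-loops (currentbit = 5,1 and currentbit = 0)
  simp only [BWR_Encode_4, BWR_Encode_4_alt,
    show ∀ s, pvAOuterNib imgdif totalbytes 5 s
        = (PySem.List.pyRange 0 totalbytes 1).foldl (pvAStepNib imgdif 1)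
            ((PySem.List.pyRange 0 totalbytes 1).foldl (pvAStepNib imgdif 5) s) from fun s => by
      rw [pvAOuterNib, if_pos (by norm_num), pvAOuterNib, if_pos (by norm_num),
        pvAOuterNib, if_neg (by norm_num)]
      norm_num,
    show ∀ s, pvAOuterBit imgdif totalbytes 0 s
        = (PySem.List.pyRange 0 totalbytes 1).foldl (pvAStepBit imgdif 0) s from fun s => by
      rw [pvAOuterBit, if_pos (by norm_num), pvAOuterBit, if_neg (by norm_num)]]
  -- A's fused loop bodies = pack steps over the extracted value lists
  have e5 : pvAStepNib imgdif 5 =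
      fun s i => pvPackStep 4 s (PySem.Int.band (PySem.List.pyGetD imgdif i 0 >>> (5:Nat)) 15) :=
    funext fun s => funext fun i => pvStepNib5 imgdif s i
  have e1 : pvAStepNib imgdif 1 =
      fun s i => pvPackStep 4 s (PySem.Int.band (PySem.List.pyGetD imgdif i 0 >>> (1:Nat)) 15) :=
    funext fun s => funext fun i => pvStepNib1 imgdif s i
  have e0 : pvAStepBit imgdif 0 =
      fun s i => pvPackStep 1 s (PySem.Int.band (PySem.List.pyGetD imgdif i 0) 1) :=
    funext fun s => funext fun i => pvStepBit0 imgdif s i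
  rw [e5, e1, e0,
    show ∀ s, (PySem.List.pyRange 0 totalbytes 1).foldl
        (fun s i => pvPackStep 4 s (PySem.Int.band (PySem.List.pyGetD imgdif i 0 >>> (5:Nat)) 15)) s
      = ((PySem.List.pyRange 0 totalbytes 1).map
          (fun i => PySem.Int.band (PySem.List.pyGetD imgdif i 0 >>> (5:Nat)) 15)).foldl
          (pvPackStep 4) s from fun s => List.foldl_map.symm,
    show ∀ s, (PySem.List.pyRange 0 totalbytes 1).foldl
        (fun s i => pvPackStep 4 s (PySem.Int.band (PySem.List.pyGetD imgdif i 0 >>> (1:Nat)) 15)) s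
      = ((PySem.List.pyRange 0 totalbytes 1).map
          (fun i => PySem.Int.band (PySem.List.pyGetD imgdif i 0 >>> (1:Nat)) 15)).foldl
          (pvPackStep 4) s from fun s => List.foldl_map.symm,
    show ∀ s, (PySem.List.pyRange 0 totalbytes 1).foldl
        (fun s i => pvPackStep 1 s (PySem.Int.band (PySem.List.pyGetD imgdif i 0) 1)) s
      = ((PySem.List.pyRange 0 totalbytes 1).map
          (fun i => PySem.Int.band (PySem.List.pyGetD imgdif i 0) 1)).foldl
          (pvPackStep 1) s from fun s => List.foldl_map.symm,
    ← List.foldl_append,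
    pvNibPhase (PySem.List.pyRange 0 totalbytes 1).length _ []
      (by simp [List.length_append, List.length_map]; ring),
    List.nil_append, pvFlushIf, pvBitPhase]
  rw [pvBridgePair ((PySem.List.pyRange 0 totalbytes 1).length) _
      (by simp [List.length_append, List.length_map]; ring),
    pvBridgeBit]
  simp only [List.map_map, Function.comp_def]
  simp
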